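-- pv_equiv track=rewrite | github.com/leestana01/Programmers-Coding-Test-Practice | Level 1 _ py/제일 작은 수 제거하기.py | solution
-- ===== SOURCE A (Python) =====
-- def solution(arr):
--
--     chk = arr[0]
--     for i in arr:
--         if i <= chk:
--             chk = i
--     arr.remove(chk)
--     if len(arr) == 0:
--         arr.append(-1)
--     return arr
-- ===== SOURCE B (Python) =====
-- def solution(arr):
--     # Streaming construction: the answer (arr minus the first minimum) is built
--     # incrementally; no index is tracked and nothing is ever deleted.
--     # (A mutates arr in place; B builds a new list — equivalence is about the return value.)
--     cur = arr[0]
--     before, after = [], []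
--     for x in arr[1:]:
--         if x < cur:
--             before.append(cur)
--             before.extend(after)
--             after = []
--             cur = x
--         else:
--             after.append(x)
--     return (before + after) or [-1]
-- ===== Notes on version B (the rewrite author's own statement) =====
-- stated objective: alternative
-- what changed: B never locates or deletes the minimum: a single streaming pass builds the answer incrementally, keeping the current minimum aside and the kept elements split into before/after buffers that are merged when a smaller element displaces it; A finds the minimum by a value scan and then deletes it with remove's rescan (A mutates arr in place, B returns a new list; equivalence is about the return value).
import Mathlib
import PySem

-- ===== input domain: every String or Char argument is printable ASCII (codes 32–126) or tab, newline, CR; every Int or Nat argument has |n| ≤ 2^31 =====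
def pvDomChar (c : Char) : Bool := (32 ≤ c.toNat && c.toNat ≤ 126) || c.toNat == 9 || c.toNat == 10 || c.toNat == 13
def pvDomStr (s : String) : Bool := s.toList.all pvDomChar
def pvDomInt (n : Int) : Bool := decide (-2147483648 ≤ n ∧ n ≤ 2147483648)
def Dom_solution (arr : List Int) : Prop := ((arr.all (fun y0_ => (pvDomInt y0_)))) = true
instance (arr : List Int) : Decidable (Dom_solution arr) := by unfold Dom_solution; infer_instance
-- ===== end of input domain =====

-- B builds the answer in one streaming pass (current minimum kept aside, kept
-- elements in before/after buffers) instead of A's find-min scan plus remove's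
-- rescan; A mutates arr in place, B returns a new list — equivalence is about
-- the return value.

-- ===== PORT A =====
def solution (arr : List Int) : List Int :=
  match PySem.List.pyGet? arr 0 with
  | none => []            -- IndexError on empty input; excluded by Pre_solution
  | some c0 =>
    let chk := arr.foldl (fun chk i => if i ≤ chk then i else chk) c0
    match PySem.List.remove? arr chk with
    | none => []          -- ValueError; unreachable (chk is an element of arr)
    | some a => if a.length = 0 then a ++ [-1] else a

-- ===== PORT B =====
def solution_alt (arr : List Int) : List Int :=
  match arr with
  | [] => []              -- IndexError on empty input; excluded by Pre_solution
  | x :: xs =>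
    let s := xs.foldl
      (fun (s : Int × List Int × List Int) v =>
        if v < s.1 then (v, s.2.1 ++ s.1 :: s.2.2, []) else (s.1, s.2.1, s.2.2 ++ [v]))
      (x, [], [])
    let out := s.2.1 ++ s.2.2
    if out = [] then [-1] else out

-- ===== PRECONDITION & SPEC =====
-- Pre_ excludes only the empty list, on which A raises IndexError at arr[0].
def Pre_solution (arr : List Int) : Prop := arr ≠ []
instance (arr : List Int) : Decidable (Pre_solution arr) := by unfold Pre_solution; infer_instance
def pvWitness_solution : List Int := ([3, 1, 2] : List Int)

def Spec_solution (arr : List Int) (out : List Int) : Prop := out = solution_alt arr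
instance (arr : List Int) (out : List Int) : Decidable (Spec_solution arr out) := by unfold Spec_solution; infer_instance

-- ===== CLAIM (what is proved, stated in full; the proofs are below) =====
def Claim_equal_solution : Prop := ∀ (arr : List Int), Dom_solution arr → Pre_solution arr → Spec_solution arr (solution arr)

-- ===== LEMMAS AND PROOFS =====

-- A's fold (keep on ≤) computes the same value as folding with min.
theorem fold_if_eq_fold_min (l : List Int) (c : Int) :
    l.foldl (fun c i => if i ≤ c then i else c) c = l.foldl min c := by
  induction l generalizing c with
  | nil => rfl
  | cons x t ih =>
    simp only [List.foldl_cons, ih]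
    congr 1
    by_cases h : x ≤ c <;> simp [min_def, h] <;> try omega

theorem fold_min_mem_or (l : List Int) (c : Int) :
    l.foldl min c = c ∨ l.foldl min c ∈ l := by
  induction l generalizing c with
  | nil => left; rfl
  | cons x t ih =>
    rcases ih (min c x) with h | h
    · rw [List.foldl_cons, h]
      rcases min_choice c x with h' | h'
      · left; exact h'
      · right; rw [h']; exact List.mem_cons_self
    · right; exact List.mem_cons_of_mem _ h

-- A in canonical form: erase the first occurrence of the minimum.
theorem solution_eq_canon (x : Int) (xs : List Int) :
    solution (x :: xs)
    = (let e := (x :: xs).erase (xs.foldl min x)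
       if e.length = 0 then e ++ [-1] else e) := by
  unfold solution
  rw [PySem.List.pyGet?_zero_cons]
  simp only [List.foldl_cons, fold_if_eq_fold_min]
  rw [if_pos (le_refl x)]
  have hmem : xs.foldl min x ∈ x :: xs := by
    rcases fold_min_mem_or xs x with h | h
    · rw [h]; exact List.mem_cons_self
    · exact List.mem_cons_of_mem _ h
  rw [PySem.List.remove?_eq_some_erase _ _ hmem]

-- Invariant of B's streaming fold: starting from state (c, b, a) where every
-- element of b is > c and every element of a is ≥ c, the fold returns the
-- running minimum M and buffers whose concatenation is (b ++ c :: a ++ l) with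
-- the first occurrence of M erased.
theorem bfold_inv (l : List Int) (c : Int) (b a : List Int)
    (hb : ∀ y ∈ b, c < y) (ha : ∀ y ∈ a, c ≤ y) :
    (l.foldl
      (fun (s : Int × List Int × List Int) v =>
        if v < s.1 then (v, s.2.1 ++ s.1 :: s.2.2, []) else (s.1, s.2.1, s.2.2 ++ [v]))
      (c, b, a))
    = (l.foldl min c,
       ((l.foldl
          (fun (s : Int × List Int × List Int) v =>
            if v < s.1 then (v, s.2.1 ++ s.1 :: s.2.2, []) else (s.1, s.2.1, s.2.2 ++ [v]))
          (c, b, a)).2.1),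
       ((l.foldl
          (fun (s : Int × List Int × List Int) v =>
            if v < s.1 then (v, s.2.1 ++ s.1 :: s.2.2, []) else (s.1, s.2.1, s.2.2 ++ [v]))
          (c, b, a)).2.2))
    ∧ ((l.foldl
          (fun (s : Int × List Int × List Int) v =>
            if v < s.1 then (v, s.2.1 ++ s.1 :: s.2.2, []) else (s.1, s.2.1, s.2.2 ++ [v]))
          (c, b, a)).2.1)
      ++ ((l.foldl
          (fun (s : Int × List Int × List Int) v =>
            if v < s.1 then (v, s.2.1 ++ s.1 :: s.2.2, []) else (s.1, s.2.1, s.2.2 ++ [v]))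
          (c, b, a)).2.2)
      = (b ++ c :: (a ++ l)).erase (l.foldl min c) := by
  induction l generalizing c b a with
  | nil =>
    have hcb : c ∉ b := fun h => lt_irrefl c (hb c h)
    constructor
    · rfl
    · simp only [List.foldl_nil, List.append_nil]
      rw [List.erase_append_right _ hcb, List.erase_cons_head]
  | cons v t ih =>
    by_cases hv : v < c
    · have hb' : ∀ y ∈ b ++ c :: a, v < y := by
        intro y hy
        rcases List.mem_append.mp hy with h | h
        · exact lt_trans hv (hb y h)
        · rcases List.mem_cons.mp h with h | h
          · omega
          · exact lt_of_lt_of_le hv (ha y h)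
      have := ih v (b ++ c :: a) [] hb' (by simp)
      simp only [List.foldl_cons, if_pos hv]
      have hmin : min c v = v := by omega
      rw [hmin]
      refine ⟨this.1, ?_⟩
      rw [this.2]
      simp [List.append_assoc]
    · have ha' : ∀ y ∈ a ++ [v], c ≤ y := by
        intro y hy
        rcases List.mem_append.mp hy with h | h
        · exact ha y h
        · simp at h; omega
      have := ih c b (a ++ [v]) hb ha'
      simp only [List.foldl_cons, if_neg hv]
      have hmin : min c v = c := by omega
      rw [hmin]
      refine ⟨this.1, ?_⟩
      rw [this.2]
      simp [List.append_assoc]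

-- B in the same canonical form.
theorem solution_alt_eq_canon (x : Int) (xs : List Int) :
    solution_alt (x :: xs)
    = (let e := (x :: xs).erase (xs.foldl min x)
       if e.length = 0 then e ++ [-1] else e) := by
  unfold solution_alt
  have h := bfold_inv xs x [] [] (by simp) (by simp)
  simp only [List.nil_append] at h
  dsimp only
  rw [h.2]
  by_cases he : (x :: xs).erase (xs.foldl min x) = []
  · simp [he]
  · simp [List.length_eq_zero_iff, he]

-- ===== VERDICT (by name: the statement is the Claim_ definition above) =====
theorem solution_spec : Claim_equal_solution := by
  intro arr _ hpre
  match arr with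
  | [] => exact absurd rfl hpre
  | x :: xs =>
    unfold Spec_solution
    rw [solution_eq_canon, solution_alt_eq_canon]
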